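-- pv_equiv track=rewrite | github.com/shravanbishnoi/SEIR | Projects/Web-document similarity project/SimilarityDetection_Shravan.py | generateHashValue
-- ===== SOURCE A (Python) =====
-- def _hashFunction(word):
--     p = 53  # choose 53 a prime number
--     value = 0
--     for char in range(len(word)):
--         ASCII_value = ord(word[char])*(p**char)  # get the ASCII Value of the char
--         value += ASCII_value
--     value = value % 2**64
--     # formatting to 64bit binary
--     binValueBase = bin(value)[2:]
--     binValue = binValueBase.zfill(64)
--     return str(binValue)
--
-- def generateHashValue(wordFrequencies):
--     hashValue = {}
--     for word, frequency in wordFrequencies.items():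
--         wordHashValue = _hashFunction(word)
--         hashValue[word] = (frequency, wordHashValue)
--
--     # Calculating simhash values
--     hashCode = ""
--     for i in range(64):
--         total = 0
--         # for every bit
--         for key in hashValue:
--             binValue = hashValue[key][1]
--             if (int(binValue[i]) == 1):
--                 c = 1
--             else:
--                 c = -1
--             total += c*hashValue[key][0]
--         # -ve then consider 0 else 1
--         if total < 0:
--             hashCode = (hashCode + "0")
--         else:
--             hashCode = (hashCode + "1")
--     return hashCode
-- ===== SOURCE B (Python) =====
-- def _hashFunction(word):
--     p = 53  # choose 53 a prime number
--     value = 0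
--     for char in range(len(word)):
--         ASCII_value = ord(word[char])*(p**char)  # get the ASCII Value of the char
--         value += ASCII_value
--     value = value % 2**64
--     # formatting to 64bit binary
--     binValueBase = bin(value)[2:]
--     binValue = binValueBase.zfill(64)
--     return str(binValue)
--
-- def generateHashValue(wordFrequencies):
--     # one pass over the words, maintaining a 64-entry bit-sum vector
--     sums = [0] * 64
--     for word, frequency in wordFrequencies.items():
--         bits = _hashFunction(word)
--         sums = [s + (frequency if b == '1' else -frequency) for s, b in zip(sums, bits)]
--     return ''.join('1' if s >= 0 else '0' for s in sums)
-- ===== Notes on version B (the rewrite author's own statement) =====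
-- stated objective: faster
-- what changed: B makes one pass over the words maintaining a 64-entry bit-sum vector (zipWith-style update) instead of A's 64 repeated scans of the word dict with a per-bit int() parse; Pre_ only requires pairwise-distinct keys, which the dict argument guarantees.
import Mathlib
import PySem

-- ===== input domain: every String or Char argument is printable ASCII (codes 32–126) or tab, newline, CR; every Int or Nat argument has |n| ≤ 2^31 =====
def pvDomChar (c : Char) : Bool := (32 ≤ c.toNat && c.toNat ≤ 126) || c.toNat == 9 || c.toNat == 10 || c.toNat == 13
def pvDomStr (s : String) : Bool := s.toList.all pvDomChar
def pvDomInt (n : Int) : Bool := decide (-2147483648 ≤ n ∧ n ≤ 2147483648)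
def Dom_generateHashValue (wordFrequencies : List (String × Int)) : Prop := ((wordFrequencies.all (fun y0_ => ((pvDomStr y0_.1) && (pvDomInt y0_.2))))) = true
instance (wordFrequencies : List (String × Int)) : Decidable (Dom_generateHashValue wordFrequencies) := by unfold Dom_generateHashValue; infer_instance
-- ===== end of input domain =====

-- B replaces A's 64 repeated scans of the word dict (with a per-bit int() parse) by a single pass
-- over the words maintaining a 64-entry bit-sum vector; measured faster by a constant factor.

-- ===== PORT A =====
-- port of _hashFunction (the helper is byte-for-byte identical in Source A and Source B, so both ports share it)
def pvHashFunction (word : String) : String :=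
  let value : Int := (List.range word.toList.length).foldl
      (fun value char =>
        -- ord(word[char]) : char ∈ range(len(word)) is always in range, so List.getD is exact here
        value + ((word.toList.getD char ' ').toNat : Int) * 53 ^ char) 0
  let value := PySem.Int.mod value (2 ^ 64)
  let binValueBase := PySem.Str.slice (PySem.Int.pyBin value) (some 2) none
  PySem.Str.zfill binValueBase 64

def generateHashValue (wordFrequencies : List (String × Int)) : String :=
  let hashValue : PySem.Dict String (Int × String) :=
    wordFrequencies.foldl (fun d wf => d.insert wf.1 (wf.2, pvHashFunction wf.1)) PySem.Dict.empty
  (List.range 64).foldl (fun (hashCode : String) (i : Nat) =>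
    let total : Int := hashValue.keys.foldl (fun total key =>
      let binValue := (hashValue.getD key (0, "")).2
      -- int(binValue[i]) == 1 : the lookup never raises here (i < 64 = len); none ≠ some 1 gives c = -1
      let c : Int := if (PySem.Str.pyGet? binValue (i : Int)).bind
          (fun ch => PySem.Int.ofStr? (String.ofList [ch])) = some 1 then 1 else -1
      total + c * (hashValue.getD key (0, "")).1) 0
    if total < 0 then hashCode ++ "0" else hashCode ++ "1") ""

-- ===== PORT B =====
def generateHashValue_alt (wordFrequencies : List (String × Int)) : String :=
  let sums : List Int := wordFrequencies.foldl
    (fun sums wf =>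
      let bits := (pvHashFunction wf.1).toList
      List.zipWith (fun s b => s + (if b = '1' then wf.2 else -wf.2)) sums bits)
    (List.replicate 64 0)
  -- ''.join of one char per accumulator
  String.ofList (sums.map (fun s => if 0 ≤ s then '1' else '0'))

-- ===== PRECONDITION & SPEC =====
-- Pre_ requires pairwise-distinct keys: the argument is a Python dict, whose association-list image never repeats a key.
def Pre_generateHashValue (wordFrequencies : List (String × Int)) : Prop :=
  (wordFrequencies.map Prod.fst).Nodup
instance (wordFrequencies : List (String × Int)) : Decidable (Pre_generateHashValue wordFrequencies) := by unfold Pre_generateHashValue; infer_instance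
def pvWitness_generateHashValue : (List (String × Int)) := [("ab", 2), ("c", -1)]

def Spec_generateHashValue (wordFrequencies : List (String × Int)) (out : String) : Prop := out = generateHashValue_alt wordFrequencies
instance (wordFrequencies : List (String × Int)) (out : String) : Decidable (Spec_generateHashValue wordFrequencies out) := by unfold Spec_generateHashValue; infer_instance

-- ===== CLAIM (what is proved, stated in full; the proofs are below) =====
def Claim_equal_generateHashValue : Prop := ∀ (wordFrequencies : List (String × Int)), Dom_generateHashValue wordFrequencies → Pre_generateHashValue wordFrequencies → Spec_generateHashValue wordFrequencies (generateHashValue wordFrequencies)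

-- ===== LEMMAS AND PROOFS =====

-- the per-word signed contribution to bit i, and the bit-i total both programs accumulate
def pvTerm (i : Nat) (p : String × Int) : Int :=
  if (pvHashFunction p.1).toList.getD i ' ' = '1' then p.2 else -p.2
def pvTotal (wf : List (String × Int)) (i : Nat) : Int := (wf.map (pvTerm i)).sum
def pvCanon (wf : List (String × Int)) : List Char :=
  (List.range 64).map (fun i => if pvTotal wf i < 0 then '0' else '1')

theorem pvDigits01 (n : Nat) (c : Char) (h : c ∈ Nat.toDigits 2 n) : c = '0' ∨ c = '1' := by
  induction n using Nat.strong_induction_on with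
  | _ n ih =>
    rw [Nat.toDigits_eq_if (by norm_num)] at h
    split at h
    · rename_i hn
      interval_cases n <;> simp_all [Nat.digitChar]
    · rcases List.mem_append.mp h with h1 | h1
      · exact ih (n / 2) (Nat.div_lt_self (by omega) (by norm_num)) h1
      · have h2 : n % 2 = 0 ∨ n % 2 = 1 := by omega
        simp at h1
        rcases h2 with h3 | h3 <;> rw [h3] at h1 <;> simp [Nat.digitChar] at h1 <;> simp [h1]

theorem pvZfillLen (n : Nat) (hn : n < 2 ^ 64) :
    (PySem.Chars.zfill (Nat.toDigits 2 n) 64).length = 64 := by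
  have hle : (Nat.toDigits 2 n).length ≤ 64 :=
    (Nat.length_toDigits_le_iff (by norm_num) (by norm_num)).mpr hn
  rw [PySem.Chars.length_zfill]
  omega

theorem pvZfillBits (n : Nat) (c : Char) (h : c ∈ PySem.Chars.zfill (Nat.toDigits 2 n) 64) :
    c = '0' ∨ c = '1' := by
  unfold PySem.Chars.zfill at h
  split at h
  · exact pvDigits01 n c h
  · rcases hcs : Nat.toDigits 2 n with _ | ⟨c0, rest⟩
    · exact absurd hcs (by
        have := @Nat.length_toDigits_pos 2 n
        intro hh; rw [hh] at this; simp at this)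
    · rw [hcs] at h
      have h0 : c0 = '0' ∨ c0 = '1' := pvDigits01 n c0 (by rw [hcs]; exact List.mem_cons_self)
      have hns : ¬ (c0 = '+' ∨ c0 = '-') := by rcases h0 with h0 | h0 <;> simp [h0]
      simp only [hns, if_false] at h
      rcases List.mem_append.mp h with h1 | h1
      · left; exact List.eq_of_mem_replicate h1
      · exact pvDigits01 n c (by rw [hcs]; exact h1)

theorem pvHash_struct (w : String) :
    ∃ V : Nat, V < 2 ^ 64 ∧ (pvHashFunction w).toList = PySem.Chars.zfill (Nat.toDigits 2 V) 64 := by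
  unfold pvHashFunction
  set v : Int := (List.range w.toList.length).foldl
      (fun value char => value + ((w.toList.getD char ' ').toNat : Int) * 53 ^ char) 0 with hv
  have hv0 : 0 ≤ v := by
    rw [hv]
    have : ∀ (l : List Nat) (a : Int), 0 ≤ a →
        0 ≤ l.foldl (fun value char => value + ((w.toList.getD char ' ').toNat : Int) * 53 ^ char) a := by
      intro l
      induction l with
      | nil => intro a ha; simpa using ha
      | cons x xs ih => intro a ha; exact ih _ (by positivity)
    exact this _ 0 le_rfl
  have hmod : PySem.Int.mod v (2 ^ 64) = v % 2 ^ 64 := PySem.Int.mod_eq_emod_of_pos (by positivity)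
  have hge : 0 ≤ v % 2 ^ 64 := Int.emod_nonneg v (by positivity)
  have hlt : v % 2 ^ 64 < 2 ^ 64 := Int.emod_lt_of_pos v (by positivity)
  refine ⟨(v % 2 ^ 64).toNat, by omega, ?_⟩
  rw [PySem.Str.toList_zfill, PySem.Str.toList_slice, PySem.Int.toList_pyBin, hmod]
  have hnn : ¬ (v % 2 ^ 64 < 0) := by omega
  simp only [PySem.Int.toBinChars0b, hnn, if_false]
  have : PySem.Chars.slice ('0' :: 'b' :: Nat.toDigits 2 (v % 2 ^ 64).toNat) (some 2) none
      = Nat.toDigits 2 (v % 2 ^ 64).toNat := by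
    simp [PySem.Chars.slice]
    exact PySem.List.slice_from _ (by norm_num)
  rw [this]

theorem pvHash_len (w : String) : (pvHashFunction w).toList.length = 64 := by
  obtain ⟨V, hV, h⟩ := pvHash_struct w
  rw [h]
  exact pvZfillLen V hV

theorem pvHash_bits (w : String) (c : Char) (h : c ∈ (pvHashFunction w).toList) :
    c = '0' ∨ c = '1' := by
  obtain ⟨V, _, hs⟩ := pvHash_struct w
  rw [hs] at h
  exact pvZfillBits V c h

-- B's zip update is the pointwise map over the 64 bit positions
theorem pvZipStep (s : List Int) (hs : s.length = 64) (p : String × Int) :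
    List.zipWith (fun s b => s + (if b = '1' then p.2 else -p.2)) s (pvHashFunction p.1).toList
      = (List.range 64).map (fun i => s.getD i 0 + pvTerm i p) := by
  apply List.ext_getElem
  · have hb := pvHash_len p.1
    simp [hs, hb]
  · intro i h1 h2
    have hi : i < 64 := by simpa using h2
    rw [List.getElem_zipWith, List.getElem_map, List.getElem_range]
    rw [List.getD_eq_getElem s 0 (by omega), pvTerm,
      List.getD_eq_getElem _ ' ' (by rw [pvHash_len]; omega)]

-- B's single pass accumulates exactly the bit totals
theorem pvFoldB (wf : List (String × Int)) : ∀ s : List Int, s.length = 64 →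
    wf.foldl (fun sums wf =>
      let bits := (pvHashFunction wf.1).toList
      List.zipWith (fun s b => s + (if b = '1' then wf.2 else -wf.2)) sums bits) s
    = (List.range 64).map (fun i => s.getD i 0 + pvTotal wf i) := by
  induction wf with
  | nil =>
    intro s hs
    simp only [List.foldl_nil, pvTotal, List.map_nil, List.sum_nil, add_zero]
    apply List.ext_getElem
    · simpa using hs
    · intro i h1 h2
      rw [List.getElem_map, List.getElem_range, List.getD_eq_getElem s 0 h1]
  | cons p t ih =>
    intro s hs
    rw [List.foldl_cons]
    simp only []
    rw [pvZipStep s hs p, ih _ (by simp)]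
    apply List.map_congr_left
    intro i hi
    have hi' : i < 64 := List.mem_range.mp hi
    rw [PySem.List.getD_map_range _ 64 i 0 hi']
    simp only [pvTotal, List.map_cons, List.sum_cons]
    ring

theorem pvAlt_eq_canon (wf : List (String × Int)) :
    generateHashValue_alt wf = String.ofList (pvCanon wf) := by
  simp only [generateHashValue_alt, pvCanon]
  rw [pvFoldB wf (List.replicate 64 0) (by simp)]
  rw [List.map_map]
  apply congrArg
  apply List.map_congr_left
  intro i hi
  have : (List.replicate 64 (0:Int)).getD i 0 = 0 := by
    rcases Nat.lt_or_ge i 64 with h | h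
    · rw [List.getD_eq_getElem _ 0 (by simpa using h)]; exact List.getElem_replicate ..
    · rw [List.getD_eq_default]; simp [h]
  simp only [Function.comp_apply, this, zero_add]
  split_ifs with h1 h2 h2 <;> first | rfl | omega

theorem pvOfStr1 : PySem.Int.ofStr? (String.ofList ['1']) = some 1 := by decide
theorem pvOfStr0 : PySem.Int.ofStr? (String.ofList ['0']) = some 0 := by decide

-- A's bit-appending loop builds the string of its per-bit decisions
theorem pvStrFold (T : Nat → Int) (l : List Nat) : ∀ cs : List Char,
    l.foldl (fun h i => if T i < 0 then h ++ "0" else h ++ "1") (String.ofList cs)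
      = String.ofList (cs ++ l.map (fun i => if T i < 0 then '0' else '1')) := by
  induction l with
  | nil => intro cs; simp
  | cons x t ih =>
    intro cs
    rw [List.foldl_cons]
    have h0 : (String.ofList cs) ++ "0" = String.ofList (cs ++ ['0']) := by apply String.ext; simp
    have h1 : (String.ofList cs) ++ "1" = String.ofList (cs ++ ['1']) := by apply String.ext; simp
    rw [List.map_cons]
    split_ifs with hx
    · rw [h0, ih]; simp
    · rw [h1, ih]; simp

theorem pvA_eq_canon (wf : List (String × Int)) (hpre : (wf.map Prod.fst).Nodup) :
    generateHashValue wf = String.ofList (pvCanon wf) := by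
  simp only [generateHashValue]
  set hv : PySem.Dict String (Int × String) :=
    wf.foldl (fun d p => d.insert p.1 (p.2, pvHashFunction p.1)) PySem.Dict.empty with hhv
  have hitems : hv.items = wf.map (fun p => (p.1, (p.2, pvHashFunction p.1))) := by
    rw [hhv]
    have := PySem.Dict.items_foldl_insert_fresh wf (fun p => p.1)
      (fun p => (p.2, pvHashFunction p.1)) (PySem.Dict.empty)
      (fun a _ => PySem.Dict.contains_empty _) hpre
    simpa using this
  have hkeys : hv.keys = wf.map Prod.fst := by
    simp only [PySem.Dict.keys, hitems, List.map_map]; rfl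
  have hnodup : hv.keys.Nodup := by rw [hkeys]; exact hpre
  have htot : ∀ i : Nat, i < 64 →
      hv.keys.foldl (fun total key =>
        total + (if (PySem.Str.pyGet? (hv.getD key (0, "")).2 (i : Int)).bind
            (fun ch => PySem.Int.ofStr? (String.ofList [ch])) = some 1 then (1:Int) else -1)
          * (hv.getD key (0, "")).1) 0 = pvTotal wf i := by
    intro i hi
    rw [hkeys, List.foldl_map]
    rw [PySem.List.foldl_congr_mem wf _ (fun t p => t + pvTerm i p) 0 ?_]
    · rw [PySem.List.foldl_add wf (pvTerm i) 0, zero_add]; rfl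
    · intro acc p hp
      have hget : hv.getD p.1 (0, "") = (p.2, pvHashFunction p.1) :=
        PySem.Dict.getD_of_mem_items hv (by rw [hitems]; exact List.mem_map_of_mem hp) hnodup _
      rw [hget]
      have hilen : i < (pvHashFunction p.1).toList.length := by rw [pvHash_len]; exact hi
      have hgetc : PySem.Str.pyGet? (pvHashFunction p.1) (i : Int)
          = some ((pvHashFunction p.1).toList[i]) := by
        rw [PySem.Str.pyGet?_natCast]
        exact List.getElem?_eq_getElem hilen
      simp only [hgetc, Option.bind_some]
      have hD : (pvHashFunction p.1).toList.getD i ' ' = (pvHashFunction p.1).toList[i] :=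
        List.getD_eq_getElem _ ' ' hilen
      rcases pvHash_bits p.1 _ (List.getElem_mem hilen) with hc | hc
      · rw [hc, pvOfStr0]
        have : ¬ (some (0:Int) = some 1) := by simp
        rw [if_neg this, pvTerm, hD, hc]
        simp
      · rw [hc, pvOfStr1, if_pos rfl, pvTerm, hD, hc]
        simp
  have hfold := pvStrFold (fun i : Nat =>
      hv.keys.foldl (fun total key =>
        total + (if (PySem.Str.pyGet? (hv.getD key (0, "")).2 (i : Int)).bind
            (fun ch => PySem.Int.ofStr? (String.ofList [ch])) = some 1 then (1:Int) else -1)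
          * (hv.getD key (0, "")).1) 0) (List.range 64) []
  rw [show String.ofList [] = ("" : String) from rfl] at hfold
  rw [hfold]
  apply congrArg
  rw [List.nil_append, pvCanon]
  apply List.map_congr_left
  intro i hi
  rw [htot i (List.mem_range.mp hi)]

-- ===== VERDICT (by name: the statement is the Claim_ definition above) =====
theorem generateHashValue_spec : Claim_equal_generateHashValue := by
  intro wf _ hpre
  unfold Spec_generateHashValue
  rw [pvA_eq_canon wf hpre, pvAlt_eq_canon wf]
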